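-- pv_equiv track=rewrite | github.com/ptaylor2018/AoC2020 | day17/day17.py | expand_state
-- ===== SOURCE A (Python) =====
-- def expand_state(state: dict) -> dict:
--     max_x, max_y, max_z, min_x, min_y, min_z = 0, 0, 0, 0, 0, 0
--     for point in state.keys():
--         if point[0] > max_x:
--             max_x = point[0]
--         if point[0] < min_x:
--             min_x = point[0]
--         if point[1] > max_y:
--             max_y = point[1]
--         if point[1] < min_y:
--             min_y = point[1]
--         if point[2] > max_z:
--             max_z = point[2]
--         if point[2] < min_z:
--             min_z = point[2]
--     new_state = state.copy()
--     for x in range(min_x-1,max_x+2):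
--         for y in range(min_y-1,max_y+2):
--             for z in range(min_z-1,max_z+2):
--                 tuple_to_check = (x,y,z)
--                 if not tuple_to_check in state:
--                     new_state[tuple_to_check] = "."
--     return new_state
-- ===== SOURCE B (Python) =====
-- def expand_state(state: dict) -> dict:
--     # Flat single-loop version: one pass over the volume with divmod decoding,
--     # bounds from builtin min/max over the keys plus an origin sentinel.
--     pts = list(state) + [(0, 0, 0)]
--     x0 = min(p[0] for p in pts) - 1
--     y0 = min(p[1] for p in pts) - 1
--     z0 = min(p[2] for p in pts) - 1
--     nx = max(p[0] for p in pts) + 2 - x0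
--     ny = max(p[1] for p in pts) + 2 - y0
--     nz = max(p[2] for p in pts) + 2 - z0
--     new_state = dict(state)
--     for i in range(nx * ny * nz):
--         q, dz = divmod(i, nz)
--         dx, dy = divmod(q, ny)
--         cell = (x0 + dx, y0 + dy, z0 + dz)
--         if cell not in state:
--             new_state[cell] = "."
--     return new_state
-- ===== Notes on version B (the rewrite author's own statement) =====
-- stated objective: alternative
-- what changed: A's triple nested x/y/z insertion loops are replaced by ONE flat loop over the box volume that decodes each flat index into (x,y,z) with divmod, and A's six-comparison bounds loop by builtin min/max over the keys plus an origin sentinel point.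
import Mathlib
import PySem

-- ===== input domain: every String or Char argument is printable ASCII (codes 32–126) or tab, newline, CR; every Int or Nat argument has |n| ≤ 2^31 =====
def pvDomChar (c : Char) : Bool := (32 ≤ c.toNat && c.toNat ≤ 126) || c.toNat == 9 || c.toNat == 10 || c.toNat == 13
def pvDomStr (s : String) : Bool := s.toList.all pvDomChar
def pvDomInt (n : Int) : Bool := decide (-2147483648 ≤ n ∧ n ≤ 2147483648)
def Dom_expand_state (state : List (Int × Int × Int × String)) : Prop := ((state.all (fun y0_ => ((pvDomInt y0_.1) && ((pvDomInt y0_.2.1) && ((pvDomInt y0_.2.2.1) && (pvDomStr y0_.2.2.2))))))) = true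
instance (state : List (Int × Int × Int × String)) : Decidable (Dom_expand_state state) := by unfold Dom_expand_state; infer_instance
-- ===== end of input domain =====

-- B replaces A's triple nested x/y/z loops by ONE flat loop over the volume with divmod
-- index decoding, and A's six-comparison bounds loop by min/max over keys + origin sentinel
-- (alternative decomposition; same cost).

-- ===== PORT A =====
-- key of a dict item (the (x,y,z) part of an (x,y,z,v) entry)
def pvKey (e : Int × Int × Int × String) : Int × Int × Int := (e.1, e.2.1, e.2.2.1)

-- entry built from a key and a value
def pvEnt (c : Int × Int × Int) (v : String) : Int × Int × Int × String := (c.1, c.2.1, c.2.2, v)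

-- hand-port of Python dict assignment d[c] = v on the association list
-- (exact: an existing key is overwritten in place, a new key appends at the end)
def pvDictSet (ns : List (Int × Int × Int × String)) (c : Int × Int × Int) (v : String) :
    List (Int × Int × Int × String) :=
  if ns.any (fun e => decide (pvKey e = c)) then
    ns.map (fun e => if pvKey e = c then pvEnt c v else e)
  else ns ++ [pvEnt c v]

def expand_state (state : List (Int × Int × Int × String)) : List (Int × Int × Int × String) :=
  -- for point in state.keys(): six running comparisons from (0,0,0,0,0,0)
  let b := state.foldl
    (fun (b : Int × Int × Int × Int × Int × Int) e =>
      let maxx := if e.1 > b.1 then e.1 else b.1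
      let minx := if e.1 < b.2.2.2.1 then e.1 else b.2.2.2.1
      let maxy := if e.2.1 > b.2.1 then e.2.1 else b.2.1
      let miny := if e.2.1 < b.2.2.2.2.1 then e.2.1 else b.2.2.2.2.1
      let maxz := if e.2.2.1 > b.2.2.1 then e.2.2.1 else b.2.2.1
      let minz := if e.2.2.1 < b.2.2.2.2.2 then e.2.2.1 else b.2.2.2.2.2
      (maxx, maxy, maxz, minx, miny, minz))
    (0, 0, 0, 0, 0, 0)
  -- new_state = state.copy(); triple nested range loop, insert the missing cells
  (PySem.List.pyRange (b.2.2.2.1 - 1) (b.1 + 2) 1).foldl (fun ns x =>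
    (PySem.List.pyRange (b.2.2.2.2.1 - 1) (b.2.1 + 2) 1).foldl (fun ns y =>
      (PySem.List.pyRange (b.2.2.2.2.2 - 1) (b.2.2.1 + 2) 1).foldl (fun ns z =>
        if !(state.any (fun e => decide (pvKey e = (x, y, z)))) then
          pvDictSet ns (x, y, z) "."
        else ns) ns) ns) state

-- ===== PORT B =====
def expand_state_alt (state : List (Int × Int × Int × String)) : List (Int × Int × Int × String) :=
  -- pts = list(state) + [(0, 0, 0)]
  let pts := state.map (fun e => (e.1, e.2.1, e.2.2.1)) ++ [((0 : Int), (0 : Int), (0 : Int))]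
  -- min()/max() of a nonempty list: min?/max? is never none on pts (it holds the origin), so .getD 0 is exact
  let x0 := (PySem.List.min? (pts.map (fun p => p.1)) (fun v => v)).getD 0 - 1
  let y0 := (PySem.List.min? (pts.map (fun p => p.2.1)) (fun v => v)).getD 0 - 1
  let z0 := (PySem.List.min? (pts.map (fun p => p.2.2)) (fun v => v)).getD 0 - 1
  let nx := (PySem.List.max? (pts.map (fun p => p.1)) (fun v => v)).getD 0 + 2 - x0
  let ny := (PySem.List.max? (pts.map (fun p => p.2.1)) (fun v => v)).getD 0 + 2 - y0
  let nz := (PySem.List.max? (pts.map (fun p => p.2.2)) (fun v => v)).getD 0 + 2 - z0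
  -- single flat loop over the volume; divmod decoding (nz, ny ≥ 3 here, so divmod? is never none)
  (PySem.List.pyRange 0 (nx * ny * nz) 1).foldl (fun ns i =>
    let qdz := (PySem.Int.divmod? i nz).getD (0, 0)
    let dxy := (PySem.Int.divmod? qdz.1 ny).getD (0, 0)
    let cell := (x0 + dxy.1, y0 + dxy.2, z0 + qdz.2)
    if !(state.any (fun e => decide (pvKey e = cell))) then
      pvDictSet ns cell "."
    else ns) state

-- ===== PRECONDITION & SPEC =====
def Spec_expand_state (state : List (Int × Int × Int × String)) (out : List (Int × Int × Int × String)) : Prop := out = expand_state_alt state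
instance (state : List (Int × Int × Int × String)) (out : List (Int × Int × Int × String)) : Decidable (Spec_expand_state state out) := by unfold Spec_expand_state; infer_instance

-- ===== CLAIM (what is proved, stated in full; the proofs are below) =====
def Claim_equal_expand_state : Prop := ∀ (state : List (Int × Int × Int × String)), Dom_expand_state state → Spec_expand_state state (expand_state state)

-- ===== LEMMAS AND PROOFS =====

theorem pvStepMax (m v : Int) : (if v > m then v else m) = max m v := by
  rw [max_def]; split_ifs <;> omega

theorem pvStepMin (m v : Int) : (if v < m then v else m) = min m v := by
  rw [min_def]; split_ifs <;> omega

-- A's six-comparison fold splits into six independent running min/max folds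
theorem bounds_split (state : List (Int × Int × Int × String)) (b0 : Int × Int × Int × Int × Int × Int) :
    state.foldl
      (fun (b : Int × Int × Int × Int × Int × Int) e =>
        let maxx := if e.1 > b.1 then e.1 else b.1
        let minx := if e.1 < b.2.2.2.1 then e.1 else b.2.2.2.1
        let maxy := if e.2.1 > b.2.1 then e.2.1 else b.2.1
        let miny := if e.2.1 < b.2.2.2.2.1 then e.2.1 else b.2.2.2.2.1
        let maxz := if e.2.2.1 > b.2.2.1 then e.2.2.1 else b.2.2.1
        let minz := if e.2.2.1 < b.2.2.2.2.2 then e.2.2.1 else b.2.2.2.2.2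
        (maxx, maxy, maxz, minx, miny, minz)) b0
    = ((state.map (fun p => p.1)).foldl max b0.1,
       (state.map (fun p => p.2.1)).foldl max b0.2.1,
       (state.map (fun p => p.2.2.1)).foldl max b0.2.2.1,
       (state.map (fun p => p.1)).foldl min b0.2.2.2.1,
       (state.map (fun p => p.2.1)).foldl min b0.2.2.2.2.1,
       (state.map (fun p => p.2.2.1)).foldl min b0.2.2.2.2.2) := by
  induction state generalizing b0 with
  | nil => rfl
  | cons e t ih =>
    simp only [List.foldl_cons, List.map_cons]
    rw [ih]
    simp only [pvStepMax, pvStepMin]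

theorem pvFoldMaxInit (t : List Int) (a b : Int) :
    t.foldl max (max a b) = max a (t.foldl max b) := by
  induction t generalizing b with
  | nil => simp
  | cons v r ih => simp only [List.foldl_cons, max_assoc]; exact ih (max b v)

theorem pvFoldMinInit (t : List Int) (a b : Int) :
    t.foldl min (min a b) = min a (t.foldl min b) := by
  induction t generalizing b with
  | nil => simp
  | cons v r ih => simp only [List.foldl_cons, min_assoc]; exact ih (min b v)

-- min(xs + [0]) is A's running min seeded with 0
theorem pvMinAug (xs : List Int) :
    (PySem.List.min? (xs ++ [0]) (fun v => v)).getD 0 = xs.foldl min 0 := by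
  cases xs with
  | nil => simp [PySem.List.min?_id_cons]
  | cons x t =>
    rw [List.cons_append, PySem.List.min?_id_cons, Option.getD_some, List.foldl_append]
    simp only [List.foldl_cons, List.foldl_nil]
    rw [pvFoldMinInit t 0 x, min_comm]

theorem pvMaxAug (xs : List Int) :
    (PySem.List.max? (xs ++ [0]) (fun v => v)).getD 0 = xs.foldl max 0 := by
  cases xs with
  | nil => simp [PySem.List.max?_id_cons]
  | cons x t =>
    rw [List.cons_append, PySem.List.max?_id_cons, Option.getD_some, List.foldl_append]
    simp only [List.foldl_cons, List.foldl_nil]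
    rw [pvFoldMaxInit t 0 x, max_comm]

-- List.range of a product enumerates the blocks q*n2 + r in order
theorem pvRangeMul (n1 n2 : Nat) :
    List.range (n1 * n2) = (List.range n1).flatMap (fun q => (List.range n2).map (fun r => q * n2 + r)) := by
  induction n1 with
  | zero => simp
  | succ k ih =>
    rw [Nat.succ_mul, List.range_add, ih, List.range_succ, List.flatMap_append]
    simp

-- the flat divmod-decoded volume walk IS the nested box walk (as coordinate lists)
theorem pvBoxDecode (ax ay az : Int) (n1 n2 n3 : Nat) (h2 : 0 < n2) (h3 : 0 < n3) :
    (PySem.List.pyRange 0 ((n1 * n2 * n3 : Nat) : Int) 1).map (fun i =>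
        ((ax + PySem.Int.floordiv (PySem.Int.floordiv i (n3 : Int)) (n2 : Int),
          ay + PySem.Int.mod (PySem.Int.floordiv i (n3 : Int)) (n2 : Int),
          az + PySem.Int.mod i (n3 : Int)) : Int × Int × Int))
    = (PySem.List.pyRange ax (ax + (n1 : Int)) 1).flatMap (fun x =>
        (PySem.List.pyRange ay (ay + (n2 : Int)) 1).flatMap (fun y =>
          (PySem.List.pyRange az (az + (n3 : Int)) 1).map (fun z => (x, y, z)))) := by
  rw [PySem.List.pyRange_one 0, PySem.List.pyRange_one ax, PySem.List.pyRange_one ay,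
      PySem.List.pyRange_one az]
  have e1 : ((n1 * n2 * n3 : Nat) : Int) - 0 = ((n1 * n2 * n3 : Nat) : Int) := by ring
  rw [e1, Int.toNat_natCast]
  have e2 : (ax + (n1:Int) - ax).toNat = n1 := by omega
  have e3 : (ay + (n2:Int) - ay).toNat = n2 := by omega
  have e4 : (az + (n3:Int) - az).toNat = n3 := by omega
  rw [e2, e3, e4, mul_assoc, pvRangeMul n1 (n2*n3), pvRangeMul n2 n3]
  simp only [List.map_flatMap, List.flatMap_map, List.map_map, Function.comp_def]
  refine List.flatMap_congr (fun kx hkx => ?_)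
  refine List.flatMap_congr (fun ky hky => ?_)
  rw [List.mem_range] at hky
  refine List.map_congr_left (fun kz hkz => ?_)
  rw [List.mem_range] at hkz
  have hm : kx * (n2 * n3) + (ky * n3 + kz) = (kx * n2 + ky) * n3 + kz := by ring
  simp only [zero_add]
  rw [show ((kx * (n2 * n3) + (ky * n3 + kz) : Nat) : Int) = (((kx * n2 + ky) * n3 + kz : Nat) : Int) from by rw [hm]]
  have hdiv : ((kx * n2 + ky) * n3 + kz) / n3 = kx * n2 + ky := by
    rw [add_comm, Nat.add_mul_div_right _ _ h3, Nat.div_eq_of_lt hkz]; omega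
  have hmod : ((kx * n2 + ky) * n3 + kz) % n3 = kz := by
    rw [add_comm, Nat.add_mul_mod_self_right, Nat.mod_eq_of_lt hkz]
  have hdiv2 : (kx * n2 + ky) / n2 = kx := by
    rw [add_comm, Nat.add_mul_div_right _ _ h2, Nat.div_eq_of_lt hky]; omega
  have hmod2 : (kx * n2 + ky) % n2 = ky := by
    rw [add_comm, Nat.add_mul_mod_self_right, Nat.mod_eq_of_lt hky]
  simp only [PySem.Int.floordiv_natCast, PySem.Int.mod_natCast, hdiv, hmod, hdiv2, hmod2]

-- the flat decoded fold equals the nested fold, specialized to the insertion step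
theorem pvFlatNested (state : List (Int × Int × Int × String)) (ax ay az : Int)
    (n1 n2 n3 : Nat) (h2 : 0 < n2) (h3 : 0 < n3) :
    (PySem.List.pyRange 0 ((n1 * n2 * n3 : Nat) : Int) 1).foldl (fun ns i =>
        if !(state.any (fun e => decide (pvKey e =
              (ax + PySem.Int.floordiv (PySem.Int.floordiv i (n3 : Int)) (n2 : Int),
               ay + PySem.Int.mod (PySem.Int.floordiv i (n3 : Int)) (n2 : Int),
               az + PySem.Int.mod i (n3 : Int))))) then
          pvDictSet ns
              (ax + PySem.Int.floordiv (PySem.Int.floordiv i (n3 : Int)) (n2 : Int),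
               ay + PySem.Int.mod (PySem.Int.floordiv i (n3 : Int)) (n2 : Int),
               az + PySem.Int.mod i (n3 : Int)) "."
        else ns) state
    = (PySem.List.pyRange ax (ax + (n1 : Int)) 1).foldl (fun ns x =>
        (PySem.List.pyRange ay (ay + (n2 : Int)) 1).foldl (fun ns y =>
          (PySem.List.pyRange az (az + (n3 : Int)) 1).foldl (fun ns z =>
            if !(state.any (fun e => decide (pvKey e = (x, y, z)))) then
              pvDictSet ns (x, y, z) "."
            else ns) ns) ns) state := by
  exact (List.foldl_map
      (f := fun i => ((ax + PySem.Int.floordiv (PySem.Int.floordiv i (n3 : Int)) (n2 : Int),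
                  ay + PySem.Int.mod (PySem.Int.floordiv i (n3 : Int)) (n2 : Int),
                  az + PySem.Int.mod i (n3 : Int)) : Int × Int × Int))
      (g := fun ns c => if !(state.any (fun e => decide (pvKey e = c))) then pvDictSet ns c "." else ns)
      (init := state)).symm.trans
    (by rw [pvBoxDecode ax ay az n1 n2 n3 h2 h3]
        simp only [List.foldl_flatMap, List.foldl_map])

-- both programs do the same missing-cell insertion fold over the same coordinate list
theorem main_eq (state : List (Int × Int × Int × String)) :
    expand_state state = expand_state_alt state := by
  unfold expand_state expand_state_alt
  dsimp only []
  rw [bounds_split]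
  dsimp only []
  simp only [List.map_append, List.map_map, Function.comp_def, List.map_cons, List.map_nil]
  rw [pvMinAug, pvMinAug, pvMinAug, pvMaxAug, pvMaxAug, pvMaxAug]
  set mxx := List.foldl max 0 (List.map (fun p => p.1) state) with hmxx
  set mxy := List.foldl max 0 (List.map (fun p => p.2.1) state) with hmxy
  set mxz := List.foldl max 0 (List.map (fun p => p.2.2.1) state) with hmxz
  set mnx := List.foldl min 0 (List.map (fun p => p.1) state) with hmnx
  set mny := List.foldl min 0 (List.map (fun p => p.2.1) state) with hmny
  set mnz := List.foldl min 0 (List.map (fun p => p.2.2.1) state) with hmnz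
  have hx0 : mnx ≤ 0 := hmnx ▸ (PySem.List.foldl_min_le _ 0).1
  have hy0 : mny ≤ 0 := hmny ▸ (PySem.List.foldl_min_le _ 0).1
  have hz0 : mnz ≤ 0 := hmnz ▸ (PySem.List.foldl_min_le _ 0).1
  have h0x : 0 ≤ mxx := hmxx ▸ (PySem.List.le_foldl_max _ 0).1
  have h0y : 0 ≤ mxy := hmxy ▸ (PySem.List.le_foldl_max _ 0).1
  have h0z : 0 ≤ mxz := hmxz ▸ (PySem.List.le_foldl_max _ 0).1
  clear_value mxx mxy mxz mnx mny mnz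
  clear hmxx hmxy hmxz hmnx hmny hmnz
  set n1 := (mxx + 2 - (mnx - 1)).toNat with hn1
  set n2 := (mxy + 2 - (mny - 1)).toNat with hn2
  set n3 := (mxz + 2 - (mnz - 1)).toNat with hn3
  have hc1 : ((n1 : Nat) : Int) = mxx + 2 - (mnx - 1) := by omega
  have hc2 : ((n2 : Nat) : Int) = mxy + 2 - (mny - 1) := by omega
  have hc3 : ((n3 : Nat) : Int) = mxz + 2 - (mnz - 1) := by omega
  have h2 : 0 < n2 := by omega
  have h3 : 0 < n3 := by omega
  have hNZ : mxz + 2 - (mnz - 1) ≠ 0 := by omega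
  have hNY : mxy + 2 - (mny - 1) ≠ 0 := by omega
  simp only [PySem.Int.divmod?, hNZ, hNY, ite_false, Option.getD_some]
  simp only [show ∀ a b : Int, a.fdiv b = PySem.Int.floordiv a b from fun _ _ => rfl,
             show ∀ a b : Int, a.fmod b = PySem.Int.mod a b from fun _ _ => rfl]
  rw [← hc1, ← hc2, ← hc3]
  rw [show ((n1 : Int)) * (n2 : Int) * (n3 : Int) = ((n1 * n2 * n3 : Nat) : Int) from by push_cast; ring]
  rw [show mxx + 2 = (mnx - 1) + ((n1 : Nat) : Int) from by omega,
      show mxy + 2 = (mny - 1) + ((n2 : Nat) : Int) from by omega,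
      show mxz + 2 = (mnz - 1) + ((n3 : Nat) : Int) from by omega]
  rw [pvFlatNested state (mnx - 1) (mny - 1) (mnz - 1) n1 n2 n3 h2 h3]

-- ===== VERDICT (by name: the statement is the Claim_ definition above) =====
theorem expand_state_spec : Claim_equal_expand_state := by
  intro state _
  unfold Spec_expand_state
  exact main_eq state
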